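-- pv_equiv track=rewrite | github.com/rakytap/sequential-quantum-gate-decomposer | squander/synthesis/PartAM_utils.py | get_node_mapping
-- ===== SOURCE A (Python) =====
-- from typing import List, Tuple, Set, FrozenSet
-- from itertools import permutations
--
-- def get_node_mapping(topology1: List[Tuple[int, int]], topology2: List[Tuple[int, int]]) -> dict:
--     qubits1 = set()
--     for u, v in topology1:
--         qubits1.add(u)
--         qubits1.add(v)
--     qubits2 = set()
--     for u, v in topology2:
--         qubits2.add(u)
--         qubits2.add(v)
--     if len(qubits1) != len(qubits2):
--         return {}
--     sorted_qubits1 = sorted(qubits1)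
--     sorted_qubits2 = sorted(qubits2)
--     n = len(sorted_qubits1)
--     for perm in permutations(range(n)):
--         mapping = {sorted_qubits1[i]: sorted_qubits2[perm[i]] for i in range(n)}
--         mapped_edges = set()
--         for u, v in topology1:
--             mapped_edges.add(tuple(sorted([mapping[u], mapping[v]])))
--         original_edges = set(tuple(sorted([u, v])) for u, v in topology2)
--         if mapped_edges == original_edges:
--             return mapping
--     return {}
-- ===== SOURCE B (Python) =====
-- def get_node_mapping(topology1, topology2):
--     nodes1 = sorted({q for e in topology1 for q in e})
--     nodes2 = sorted({q for e in topology2 for q in e})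
--     if len(nodes1) != len(nodes2):
--         return {}
--     n = len(nodes1)
--     idx = {q: i for i, q in enumerate(nodes1)}
--     e1 = [(idx[u], idx[v]) for u, v in topology1]
--     e1n = {(a, b) if a <= b else (b, a) for a, b in e1}
--     edges2 = {(u, v) if u <= v else (v, u) for u, v in topology2}
--
--     # degree (in the distinct-edge graphs) of every source index / target node
--     deg1 = [0] * n
--     for a, b in e1n:
--         deg1[a] += 1
--         deg1[b] += 1
--     deg2 = {q: 0 for q in nodes2}
--     for a, b in edges2:
--         deg2[a] += 1
--         deg2[b] += 1
--
--     def norm(a, b):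
--         return (a, b) if a <= b else (b, a)
--
--     def full_ok(c):
--         return {norm(c[iu], c[iv]) for iu, iv in e1} == edges2
--
--     def consistent(chosen, t):
--         # check the edges all of whose endpoints are assigned once t is placed
--         k = len(chosen)
--         c = chosen + [t]
--         return all(norm(c[iu], c[iv]) in edges2
--                    for iu, iv in e1 if max(iu, iv) == k)
--
--     def dfs(chosen, remaining):
--         # remaining stays sorted, so targets are tried in increasing order:
--         # the first complete assignment found is the lexicographically first one
--         if not remaining:
--             return chosen if full_ok(chosen) else None
--         k = len(chosen)
--         for j in range(len(remaining)):
--             t = remaining[j]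
--             if deg2[t] != deg1[k]:
--                 continue
--             if consistent(chosen, t):
--                 r = dfs(chosen + [t], remaining[:j] + remaining[j + 1:])
--                 if r is not None:
--                     return r
--         return None
--
--     c = dfs([], nodes2)
--     if c is None:
--         return {}
--     return dict(zip(nodes1, c))
-- ===== Notes on version B (the rewrite author's own statement) =====
-- stated objective: alternative
-- what changed: A tries all n! permutations of the node set and re-checks the whole edge set for each; B does a backtracking search that assigns target nodes in increasing order, pruning any partial assignment whose newly completed edges do not map into topology2's edge set or whose candidate target has the wrong degree, returning the same lexicographically-first mapping.
import Mathlib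
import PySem

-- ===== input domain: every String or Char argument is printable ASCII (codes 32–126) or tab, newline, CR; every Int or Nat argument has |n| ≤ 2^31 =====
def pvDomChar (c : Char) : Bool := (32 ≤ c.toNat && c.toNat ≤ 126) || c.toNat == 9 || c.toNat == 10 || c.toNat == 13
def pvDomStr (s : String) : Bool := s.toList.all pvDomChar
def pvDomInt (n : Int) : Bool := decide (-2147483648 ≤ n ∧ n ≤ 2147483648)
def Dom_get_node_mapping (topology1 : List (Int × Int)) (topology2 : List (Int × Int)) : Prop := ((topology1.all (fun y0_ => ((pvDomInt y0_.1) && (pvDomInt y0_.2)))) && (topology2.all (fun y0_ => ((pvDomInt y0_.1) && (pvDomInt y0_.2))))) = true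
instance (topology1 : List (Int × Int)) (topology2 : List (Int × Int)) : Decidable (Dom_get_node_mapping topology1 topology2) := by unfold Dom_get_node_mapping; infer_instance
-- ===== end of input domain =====

-- B replaces A's scan of all n! permutations by a backtracking search with edge-consistency
-- pruning that tries targets in increasing order, so it finds the same (first) mapping.

-- ===== PORT A =====

-- tuple(sorted([a, b])) for two ints
def pvNorm (a b : Int) : Int × Int := if a ≤ b then (a, b) else (b, a)

-- qubits = set(); for u, v in topology: qubits.add(u); qubits.add(v)
def pvNodes (t : List (Int × Int)) : PySem.Set Int :=
  t.foldl (fun s e => PySem.Set.add (PySem.Set.add s e.1) e.2) PySem.Set.empty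

def get_node_mapping (topology1 : List (Int × Int)) (topology2 : List (Int × Int)) : List (Int × Int) :=
  let qubits1 := pvNodes topology1
  let qubits2 := pvNodes topology2
  if PySem.Set.len qubits1 ≠ PySem.Set.len qubits2 then [] else
  let sorted1 := PySem.List.sorted qubits1 (fun x => x) false
  let sorted2 := PySem.List.sorted qubits2 (fun x => x) false
  let n := sorted1.length
  ((PySem.List.permutations (PySem.List.pyRange 0 (n : Int)) n).findSome? (fun perm =>
    -- mapping = {sorted1[i]: sorted2[perm[i]] for i in range(n)}  (all indices in range)
    let mapping : PySem.Dict Int Int :=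
      (PySem.List.pyRange 0 (n : Int)).foldl
        (fun d i => d.insert (PySem.List.pyGetD sorted1 i 0)
                             (PySem.List.pyGetD sorted2 (PySem.List.pyGetD perm i 0) 0)) ⟨[]⟩
    -- mapping[u] via getD: every endpoint of topology1 is a key of mapping
    let mapped : PySem.Set (Int × Int) :=
      topology1.foldl (fun s e => PySem.Set.add s (pvNorm (mapping.getD e.1 0) (mapping.getD e.2 0)))
        PySem.Set.empty
    let orig : PySem.Set (Int × Int) := PySem.Set.ofList (topology2.map (fun e => pvNorm e.1 e.2))
    if PySem.Set.equal mapped orig then some mapping.items else none)).getD []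

-- ===== PORT B =====

-- (a, b) if a <= b else (b, a)   (Source B's own norm helper)
def pvNormB (a b : Int) : Int × Int := if a ≤ b then (a, b) else (b, a)

-- idx[u]: position of node u in the sorted node list (idx dict built from enumerate(nodes1))
def pvIdx (s1 : List Int) (u : Int) : Int := (s1.idxOf u : Int)

-- e1 = [(idx[u], idx[v]) for u, v in topology1]
def pvE1 (s1 : List Int) (t1 : List (Int × Int)) : List (Int × Int) :=
  t1.map (fun e => (pvIdx s1 e.1, pvIdx s1 e.2))

-- full_ok(c): {norm(c[iu], c[iv]) for iu, iv in e1} == edges2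
def pvFullOk (e1 : List (Int × Int)) (ed2 : PySem.Set (Int × Int)) (c : List Int) : Bool :=
  PySem.Set.equal
    (PySem.Set.ofList (e1.map (fun p => pvNormB (PySem.List.pyGetD c p.1 0) (PySem.List.pyGetD c p.2 0))))
    ed2

-- consistent(chosen, t): the edges all of whose endpoints are assigned once t is placed map into edges2
def pvConsistent (e1 : List (Int × Int)) (ed2 : PySem.Set (Int × Int))
    (chosen : List Int) (t : Int) : Bool :=
  let c := chosen ++ [t]
  e1.all (fun p => if max p.1 p.2 = (chosen.length : Int) then
      PySem.Set.contains ed2 (pvNormB (PySem.List.pyGetD c p.1 0) (PySem.List.pyGetD c p.2 0))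
    else true)

-- e1n = {norm(a, b) for a, b in e1}
def pvE1N (e1 : List (Int × Int)) : PySem.Set (Int × Int) :=
  PySem.Set.ofList (e1.map (fun p => pvNormB p.1 p.2))

-- deg[i] += 1
def pvBump (d : List Int) (i : Int) : List Int :=
  PySem.List.pySetD d i (PySem.List.pyGetD d i 0 + 1)

-- deg1 = [0]*n; for a, b in e1n: deg1[a] += 1; deg1[b] += 1
def pvDeg1 (e1n : List (Int × Int)) (n : Nat) : List Int :=
  e1n.foldl (fun d p => pvBump (pvBump d p.1) p.2) (List.replicate n 0)

-- deg2 = {q: 0 for q in nodes2}; for a, b in edges2: deg2[a] += 1; deg2[b] += 1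
def pvDeg2 (ed2 : List (Int × Int)) (nodes2 : List Int) : PySem.Dict Int Int :=
  ed2.foldl
    (fun d q =>
      let d' := d.insert q.1 (d.getD q.1 0 + 1)
      d'.insert q.2 (d'.getD q.2 0 + 1))
    (nodes2.foldl (fun d q => d.insert q 0) ⟨[]⟩)

-- dfs(chosen, remaining); the fuel argument is always remaining.length (Source B tests 'if not remaining');
-- deg2[t] / deg1[k] via getD: t is always a key of deg2, k always in range
def pvDFS (e1 : List (Int × Int)) (ed2 : PySem.Set (Int × Int))
    (deg1 : List Int) (deg2 : PySem.Dict Int Int) :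
    Nat → List Int → List Int → Option (List Int)
  | 0, chosen, _ => if pvFullOk e1 ed2 chosen then some chosen else none
  | f + 1, chosen, rem =>
      (List.range rem.length).findSome? (fun j =>
        match rem[j]? with
        | none => none
        | some t =>
            if deg2.getD t 0 ≠ PySem.List.pyGetD deg1 (chosen.length : Int) 0 then none
            else if pvConsistent e1 ed2 chosen t then
              pvDFS e1 ed2 deg1 deg2 f (chosen ++ [t]) (rem.eraseIdx j)
            else none)

def get_node_mapping_alt (topology1 : List (Int × Int)) (topology2 : List (Int × Int)) : List (Int × Int) :=
  let nodes1 := PySem.List.sorted (PySem.Set.ofList (topology1.flatMap (fun e => [e.1, e.2]))) (fun x => x) false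
  let nodes2 := PySem.List.sorted (PySem.Set.ofList (topology2.flatMap (fun e => [e.1, e.2]))) (fun x => x) false
  if nodes1.length ≠ nodes2.length then [] else
  let e1 := pvE1 nodes1 topology1
  let e1n := pvE1N e1
  let ed2 : PySem.Set (Int × Int) := PySem.Set.ofList (topology2.map (fun e => pvNormB e.1 e.2))
  let deg1 := pvDeg1 e1n nodes1.length
  let deg2 := pvDeg2 ed2 nodes2
  match pvDFS e1 ed2 deg1 deg2 nodes2.length [] nodes2 with
  | none => []
  | some c => nodes1.zip c   -- dict(zip(nodes1, c))

-- ===== PRECONDITION & SPEC =====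
def Spec_get_node_mapping (topology1 : List (Int × Int)) (topology2 : List (Int × Int)) (out : List (Int × Int)) : Prop := out = get_node_mapping_alt topology1 topology2
instance (topology1 : List (Int × Int)) (topology2 : List (Int × Int)) (out : List (Int × Int)) : Decidable (Spec_get_node_mapping topology1 topology2 out) := by unfold Spec_get_node_mapping; infer_instance

-- ===== CLAIM (what is proved, stated in full; the proofs are below) =====
def Claim_equal_get_node_mapping : Prop := ∀ (topology1 : List (Int × Int)) (topology2 : List (Int × Int)), Dom_get_node_mapping topology1 topology2 → Spec_get_node_mapping topology1 topology2 (get_node_mapping topology1 topology2)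

-- ===== LEMMAS AND PROOFS =====

theorem pv_norm_eq : pvNorm = pvNormB := rfl

-- generic findSome? plumbing ----------------------------------------------------

theorem pv_findSome?_flatMap {α β γ : Type} (l : List α) (g : α → List β) (f : β → Option γ) :
    (l.flatMap g).findSome? f = l.findSome? (fun x => (g x).findSome? f) := by
  induction l with
  | nil => rfl
  | cons a l ih =>
    simp only [List.flatMap_cons, List.findSome?_append, ih, List.findSome?_cons]
    cases List.findSome? f (g a) <;> rfl

theorem pv_findSome?_congr {α β : Type} (l : List α) (f g : α → Option β)
    (h : ∀ x ∈ l, f x = g x) : l.findSome? f = l.findSome? g := by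
  induction l with
  | nil => rfl
  | cons a l ih =>
    simp only [List.findSome?_cons, h a (List.mem_cons_self)]
    cases g a with
    | none => exact ih (fun x hx => h x (List.mem_cons_of_mem _ hx))
    | some b => rfl

theorem pv_findSome?_if_map {α β : Type} (l : List α) (p : α → Bool) (h : α → β) :
    l.findSome? (fun x => if p x then some (h x) else none)
      = (l.findSome? (fun x => if p x then some x else none)).map h := by
  induction l with
  | nil => rfl
  | cons a l ih =>
    simp only [List.findSome?_cons]
    by_cases hp : p a <;> simp [hp, ih]

-- permutations is index-driven, so it commutes with map --------------------------

theorem pv_permutations_map {α β : Type} (f : α → β) :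
    ∀ (r : Nat) (xs : List α),
      PySem.List.permutations (xs.map f) r = (PySem.List.permutations xs r).map (List.map f) := by
  intro r
  induction r with
  | zero => intro xs; rfl
  | succ r ih =>
    intro xs
    simp only [PySem.List.permutations, List.length_map]
    rw [List.map_flatMap]
    congr 1
    funext i
    rw [List.getElem?_map]
    cases h : xs[i]? with
    | none => rfl
    | some x =>
      simp only [Option.map_some, List.eraseIdx_map, ih, List.map_map]
      rfl

-- the node set, as a flat list ---------------------------------------------------

theorem pv_nodes_aux (t : List (Int × Int)) :
    ∀ (s : PySem.Set Int),
      t.foldl (fun s e => PySem.Set.add (PySem.Set.add s e.1) e.2) s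
        = (t.flatMap (fun e => [e.1, e.2])).foldl PySem.Set.add s := by
  induction t with
  | nil => intro s; rfl
  | cons a t ih => intro s; simp only [List.foldl_cons, List.flatMap_cons, List.foldl_append, ih]; rfl

theorem pv_nodes_eq (t : List (Int × Int)) :
    pvNodes t = PySem.Set.ofList (t.flatMap (fun e => [e.1, e.2])) := by
  rw [PySem.Set.ofList_eq_foldl, pvNodes, pv_nodes_aux]; rfl

-- the dict comprehension builds exactly the zip ----------------------------------

theorem pv_dict_aux (s1 : List Int) (v : Nat → Int) :
    ∀ (l : List Nat) (d : PySem.Dict Int Int),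
      (∀ i ∈ l, ∀ p ∈ d.items, ¬ p.1 = s1.getD i 0) →
      (l.map (fun i => s1.getD i 0)).Nodup →
      (l.foldl (fun d i => d.insert (s1.getD i 0) (v i)) d).items
        = d.items ++ l.map (fun i => (s1.getD i 0, v i)) := by
  intro l
  induction l with
  | nil => intro d _ _; simp
  | cons i l ih =>
    intro d hdis hnd
    simp only [List.foldl_cons, List.map_cons]
    have hcon : d.contains (s1.getD i 0) = false := by
      simp only [PySem.Dict.contains, List.any_eq_false]
      intro p hp
      simpa using hdis i List.mem_cons_self p hp
    have hins : (d.insert (s1.getD i 0) (v i)).items = d.items ++ [(s1.getD i 0, v i)] := by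
      simp only [PySem.Dict.insert, hcon, Bool.false_eq_true, if_false]
    rw [ih (d.insert (s1.getD i 0) (v i))
        (by
          intro j hj p hp
          rw [hins] at hp
          rcases List.mem_append.mp hp with h | h
          · exact hdis j (List.mem_cons_of_mem _ hj) p h
          · have hp1 : p.1 = s1.getD i 0 := by rw [List.mem_singleton.mp h]
            rw [hp1]
            have := (List.nodup_cons.mp hnd).1
            intro heq
            apply this
            simp only []
            rw [heq]
            exact List.mem_map_of_mem hj)
        (List.nodup_cons.mp hnd).2]
    rw [hins]
    simp

theorem pv_dict_items (s1 : List Int) (v : Nat → Int) (hnd : s1.Nodup) (k : Nat) (hk : k ≤ s1.length) :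
      ((List.range k).foldl (fun d i => d.insert (s1.getD i 0) (v i)) (⟨[]⟩ : PySem.Dict Int Int)).items
        = (List.range k).map (fun i => (s1.getD i 0, v i)) := by
  rw [pv_dict_aux s1 v (List.range k) ⟨[]⟩ (by intro i _ p hp; simp at hp)
      (by
        apply List.Nodup.map_on _ (List.nodup_range)
        intro i hi j hj heq
        rw [List.mem_range] at hi hj
        rw [List.getD_eq_getElem s1 0 (lt_of_lt_of_le hi hk), List.getD_eq_getElem s1 0 (lt_of_lt_of_le hj hk)] at heq
        exact (List.Nodup.getElem_inj_iff hnd).mp heq)]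
  rfl

-- first-match lookup in a zip is indexing at idxOf -------------------------------

theorem pv_zip_lookup :
    ∀ (s1 c : List Int) (u : Int), u ∈ s1 → c.length = s1.length →
      (Option.map Prod.snd (List.find? (fun p => p.1 == u) (s1.zip c))).getD 0
        = c.getD (s1.idxOf u) 0 := by
  intro s1
  induction s1 with
  | nil => intro c u hu; simp at hu
  | cons a s1 ih =>
    intro c u hu hl
    cases c with
    | nil => simp at hl
    | cons b c =>
      by_cases h : a = u
      · subst h; simp
      · have hne : (a == u) = false := by simp [h]
        simp only [List.zip_cons_cons, List.find?, hne, List.idxOf_cons, cond_false]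
        have hu' : u ∈ s1 := by cases hu with | head => exact absurd rfl h | tail _ h' => exact h'
        rw [ih c u hu' (by simpa using hl)]
        simp

-- prefix agreement of pyGetD ------------------------------------------------------

theorem pv_pyGetD_prefix (l1 l2 : List Int) (i : Int) (h0 : 0 ≤ i) (h1 : i < l1.length) :
    PySem.List.pyGetD (l1 ++ l2) i 0 = PySem.List.pyGetD l1 i 0 := by
  rw [PySem.List.pyGetD_eq_getElem _ _ h0 (by simp; omega),
      PySem.List.pyGetD_eq_getElem _ _ h0 (by omega)]
  rw [List.getElem_append_left (by omega)]

-- pruning soundness: a failed consistency check kills all extensions --------------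

theorem pv_consistent_sound (e1 : List (Int × Int)) (ed2 : PySem.Set (Int × Int))
    (he1 : ∀ p ∈ e1, 0 ≤ p.1 ∧ 0 ≤ p.2)
    (chosen : List Int) (t : Int) (rest : List Int)
    (hc : pvConsistent e1 ed2 chosen t = false) :
    pvFullOk e1 ed2 (chosen ++ t :: rest) = false := by
  rw [pvConsistent, List.all_eq_false] at hc
  obtain ⟨p, hp, hfail⟩ := hc
  by_cases hmax : max p.1 p.2 = (chosen.length : Int)
  · simp only [hmax, Bool.not_eq_true] at hfail
    have hb1 : 0 ≤ p.1 ∧ p.1 < ((chosen ++ [t]).length : Int) := by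
      refine ⟨(he1 p hp).1, ?_⟩
      simp only [List.length_append, List.length_cons, List.length_nil]
      push_cast
      omega
    have hb2 : 0 ≤ p.2 ∧ p.2 < ((chosen ++ [t]).length : Int) := by
      refine ⟨(he1 p hp).2, ?_⟩
      simp only [List.length_append, List.length_cons, List.length_nil]
      push_cast
      omega
    have key1 : PySem.List.pyGetD (chosen ++ t :: rest) p.1 0 = PySem.List.pyGetD (chosen ++ [t]) p.1 0 := by
      have h : chosen ++ t :: rest = (chosen ++ [t]) ++ rest := by simp
      rw [h, pv_pyGetD_prefix _ _ _ hb1.1 (by exact_mod_cast hb1.2)]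
    have key2 : PySem.List.pyGetD (chosen ++ t :: rest) p.2 0 = PySem.List.pyGetD (chosen ++ [t]) p.2 0 := by
      have h : chosen ++ t :: rest = (chosen ++ [t]) ++ rest := by simp
      rw [h, pv_pyGetD_prefix _ _ _ hb2.1 (by exact_mod_cast hb2.2)]
    rw [pvFullOk, Bool.eq_false_iff]
    intro heq
    rw [PySem.Set.equal_iff] at heq
    have hmem : pvNormB (PySem.List.pyGetD (chosen ++ t :: rest) p.1 0) (PySem.List.pyGetD (chosen ++ t :: rest) p.2 0) ∈ ed2 := by
      rw [← heq, PySem.Set.mem_ofList]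
      exact List.mem_map_of_mem hp
    rw [key1, key2, ← PySem.Set.contains_iff] at hmem
    rw [hmem] at hfail
    exact absurd hfail (by simp)
  · simp only [if_neg hmax] at hfail
    exact absurd hfail (by simp)

-- degree accounting (used by the candidate filter's soundness) -----------------

theorem pv_normB_swap (a b : Int) : pvNormB a b = pvNormB b a := by
  rw [pvNormB, pvNormB]
  split_ifs <;> (try rfl) <;> (ext <;> simp <;> omega)

theorem pv_bump_getD (d : List Int) (i x : Int) (hi0 : 0 ≤ i) (hi1 : i < d.length)
    (hx0 : 0 ≤ x) (hx1 : x < d.length) :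
    PySem.List.pyGetD (pvBump d i) x 0 = PySem.List.pyGetD d x 0 + (if i = x then 1 else 0) := by
  have hi : i.toNat < d.length := by omega
  have hx : x.toNat < d.length := by omega
  rw [pvBump, PySem.List.pySetD_of_nonneg _ _ hi0,
      PySem.List.pyGetD_of_nonneg _ _ hx0, PySem.List.pyGetD_of_nonneg _ _ hx0,
      List.getD_eq_getElem _ 0 (by simpa using hx), List.getD_eq_getElem _ 0 hx,
      List.getElem_set]
  by_cases h : i = x
  · rw [if_pos (by omega), if_pos h, PySem.List.pyGetD_of_nonneg _ _ hi0,
        List.getD_eq_getElem _ 0 hi]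
    have hnn : i.toNat = x.toNat := by omega
    simp [hnn]
  · rw [if_neg (by omega), if_neg h, add_zero]

theorem pv_bump_length (d : List Int) (i : Int) : (pvBump d i).length = d.length :=
  PySem.List.length_pySetD d i _

theorem pv_deg1_fold (n : Nat) :
    ∀ (l : List (Int × Int)) (d : List Int), d.length = n →
      (∀ p ∈ l, (0 ≤ p.1 ∧ p.1 < (n:Int)) ∧ (0 ≤ p.2 ∧ p.2 < (n:Int))) →
      ∀ (k : Nat), k < n →
      PySem.List.pyGetD (l.foldl (fun d p => pvBump (pvBump d p.1) p.2) d) (k : Int) 0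
        = PySem.List.pyGetD d (k : Int) 0
          + (l.map (fun p => (if p.1 = (k:Int) then (1:Int) else 0) + (if p.2 = (k:Int) then 1 else 0))).sum := by
  intro l
  induction l with
  | nil => intro d _ _ k _; simp
  | cons q l ih =>
    intro d hd hb k hk
    simp only [List.foldl_cons, List.map_cons, List.sum_cons]
    have hq := hb q List.mem_cons_self
    have hlen1 : (pvBump d q.1).length = n := by rw [pv_bump_length, hd]
    have hlen2 : (pvBump (pvBump d q.1) q.2).length = n := by rw [pv_bump_length, hlen1]
    rw [ih (pvBump (pvBump d q.1) q.2) hlen2 (fun p hp => hb p (List.mem_cons_of_mem _ hp)) k hk]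
    rw [pv_bump_getD _ _ _ hq.2.1 (by rw [hlen1]; exact_mod_cast hq.2.2) (by positivity) (by rw [hlen1]; exact_mod_cast hk)]
    rw [pv_bump_getD _ _ _ hq.1.1 (by rw [hd]; exact_mod_cast hq.1.2) (by positivity) (by rw [hd]; exact_mod_cast hk)]
    ring

theorem pv_deg1_getD (e1n : List (Int × Int)) (n : Nat)
    (hb : ∀ p ∈ e1n, (0 ≤ p.1 ∧ p.1 < (n:Int)) ∧ (0 ≤ p.2 ∧ p.2 < (n:Int)))
    (k : Nat) (hk : k < n) :
    PySem.List.pyGetD (pvDeg1 e1n n) (k : Int) 0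
      = (e1n.map (fun p => (if p.1 = (k:Int) then (1:Int) else 0) + (if p.2 = (k:Int) then 1 else 0))).sum := by
  rw [pvDeg1, pv_deg1_fold n e1n (List.replicate n 0) (by simp) hb k hk]
  rw [PySem.List.pyGetD_natCast, List.getD_replicate 0 (by exact_mod_cast hk)]
  ring

theorem pv_dict_getD_incr (d : PySem.Dict Int Int) (a x : Int) :
    (d.insert a (d.getD a 0 + 1)).getD x 0 = d.getD x 0 + (if a = x then 1 else 0) := by
  by_cases h : a = x
  · subst h
    rw [PySem.Dict.getD_insert_self, if_pos rfl]
  · rw [if_neg h, add_zero, PySem.Dict.getD, PySem.Dict.getD,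
        PySem.Dict.get?_insert_of_ne d _ (fun hh => h hh.symm)]
    rfl

theorem pv_deg2_init (nodes2 : List Int) :
    ∀ (d : PySem.Dict Int Int), (∀ y, d.getD y 0 = 0) →
      ∀ x, (nodes2.foldl (fun d q => d.insert q 0) d).getD x 0 = 0 := by
  induction nodes2 with
  | nil => intro d h x; exact h x
  | cons q l ih =>
    intro d h x
    simp only [List.foldl_cons]
    apply ih
    intro y
    by_cases hy : q = y
    · subst hy; rw [PySem.Dict.getD_insert_self]
    · rw [PySem.Dict.getD, PySem.Dict.get?_insert_of_ne d _ (fun hh => hy hh.symm)]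
      exact h y

theorem pv_deg2_fold :
    ∀ (l : List (Int × Int)) (d : PySem.Dict Int Int) (x : Int),
      (l.foldl (fun d q =>
          let d' := d.insert q.1 (d.getD q.1 0 + 1)
          d'.insert q.2 (d'.getD q.2 0 + 1)) d).getD x 0
        = d.getD x 0 + (l.map (fun q => (if q.1 = x then (1:Int) else 0) + (if q.2 = x then 1 else 0))).sum := by
  intro l
  induction l with
  | nil => intro d x; simp
  | cons q l ih =>
    intro d x
    simp only [List.foldl_cons, List.map_cons, List.sum_cons]
    rw [ih]
    rw [pv_dict_getD_incr, pv_dict_getD_incr]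
    ring

theorem pv_deg2_getD (ed2 : List (Int × Int)) (nodes2 : List Int) (x : Int) :
    (pvDeg2 ed2 nodes2).getD x 0
      = (ed2.map (fun q => (if q.1 = x then (1:Int) else 0) + (if q.2 = x then 1 else 0))).sum := by
  rw [pvDeg2, pv_deg2_fold, pv_deg2_init nodes2 ⟨[]⟩ (fun y => rfl) x]
  ring

-- full_ok with an injective assignment forces degree preservation
theorem pv_w_normB (a b x : Int) :
    (if (pvNormB a b).1 = x then (1:Int) else 0) + (if (pvNormB a b).2 = x then 1 else 0)
      = (if a = x then (1:Int) else 0) + (if b = x then 1 else 0) := by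
  rw [pvNormB]
  split_ifs <;> simp_all

theorem pv_deg_sound (e1 : List (Int × Int)) (ed2 : List (Int × Int)) (N : Nat) (nodes2 : List Int)
    (he1 : ∀ p ∈ e1, (0 ≤ p.1 ∧ p.1 < (N:Int)) ∧ (0 ≤ p.2 ∧ p.2 < (N:Int)))
    (hnd2 : ed2.Nodup)
    (c : List Int) (hnd : c.Nodup) (hlen : c.length = N)
    (hfull : pvFullOk e1 (ed2 : PySem.Set (Int × Int)) c = true) (k : Nat) (hk : k < N) :
    (pvDeg2 ed2 nodes2).getD (c.getD k 0) 0 = PySem.List.pyGetD (pvDeg1 (pvE1N e1) N) (k : Int) 0 := by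
  -- the assignment, as a function of an index
  set C : Int → Int := fun i => PySem.List.pyGetD c i 0 with hC
  have hCinj : ∀ i j : Int, 0 ≤ i → i < (N:Int) → 0 ≤ j → j < (N:Int) → C i = C j → i = j := by
    intro i j hi0 hi1 hj0 hj1 hEq
    rw [hC] at hEq
    simp only [] at hEq
    rw [PySem.List.pyGetD_of_nonneg _ _ hi0, PySem.List.pyGetD_of_nonneg _ _ hj0,
        List.getD_eq_getElem _ 0 (by omega), List.getD_eq_getElem _ 0 (by omega)] at hEq
    have := (List.Nodup.getElem_inj_iff hnd).mp hEq
    omega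
  -- bounds and normalization of the members of e1n
  have hm1 : ∀ p ∈ (pvE1N e1 : List (Int × Int)),
      p.1 ≤ p.2 ∧ (0 ≤ p.1 ∧ p.1 < (N:Int)) ∧ (0 ≤ p.2 ∧ p.2 < (N:Int)) := by
    intro p hp
    rw [pvE1N, PySem.Set.mem_ofList] at hp
    obtain ⟨q, hq, rfl⟩ := List.mem_map.mp hp
    have := he1 q hq
    rw [pvNormB]
    split_ifs with hle
    · exact ⟨hle, this.1, this.2⟩
    · exact ⟨by omega, this.2, this.1⟩
  set h_c : Int × Int → Int × Int := fun p => pvNormB (C p.1) (C p.2) with hhc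
  -- h_c after normalization is the raw mapped edge
  have hcomm : ∀ q : Int × Int, h_c (pvNormB q.1 q.2) = pvNormB (C q.1) (C q.2) := by
    intro q
    rw [pvNormB]
    split_ifs with hle
    · rfl
    · rw [hhc]
      simp only []
      exact (pv_normB_swap _ _)
  -- members of the image list are exactly ed2
  have hmemiff : ∀ x, x ∈ (pvE1N e1 : List (Int × Int)).map h_c ↔ x ∈ ed2 := by
    intro x
    rw [pvFullOk, PySem.Set.equal_iff] at hfull
    rw [← hfull x, PySem.Set.mem_ofList]
    constructor
    · intro hx
      obtain ⟨p, hp, rfl⟩ := List.mem_map.mp hx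
      rw [pvE1N, PySem.Set.mem_ofList] at hp
      obtain ⟨q, hq, rfl⟩ := List.mem_map.mp hp
      rw [hcomm q]
      exact List.mem_map_of_mem hq
    · intro hx
      obtain ⟨q, hq, rfl⟩ := List.mem_map.mp hx
      rw [← hcomm q]
      apply List.mem_map_of_mem
      rw [pvE1N, PySem.Set.mem_ofList]
      exact List.mem_map_of_mem hq
  -- the image list has no duplicates
  have hinj : ∀ p ∈ (pvE1N e1 : List (Int × Int)), ∀ q ∈ (pvE1N e1 : List (Int × Int)),
      h_c p = h_c q → p = q := by
    intro p hp q hq hEq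
    obtain ⟨hple, hpb⟩ := hm1 p hp
    obtain ⟨hqle, hqb⟩ := hm1 q hq
    rw [hhc] at hEq
    simp only [] at hEq
    rw [pvNormB, pvNormB] at hEq
    have hp1 := hpb.1; have hp2 := hpb.2; have hq1 := hqb.1; have hq2 := hqb.2
    split_ifs at hEq <;>
      (obtain ⟨h1, h2⟩ := Prod.mk.injEq .. ▸ hEq
       first
        | (have e1' := hCinj p.1 q.1 hp1.1 hp1.2 hq1.1 hq1.2 h1
           have e2' := hCinj p.2 q.2 hp2.1 hp2.2 hq2.1 hq2.2 h2
           exact Prod.ext_iff.mpr ⟨by omega, by omega⟩)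
        | (have e1' := hCinj p.1 q.2 hp1.1 hp1.2 hq2.1 hq2.2 h1
           have e2' := hCinj p.2 q.1 hp2.1 hp2.2 hq1.1 hq1.2 h2
           exact Prod.ext_iff.mpr ⟨by omega, by omega⟩)
        | (have e1' := hCinj p.2 q.1 hp2.1 hp2.2 hq1.1 hq1.2 h1
           have e2' := hCinj p.1 q.2 hp1.1 hp1.2 hq2.1 hq2.2 h2
           exact Prod.ext_iff.mpr ⟨by omega, by omega⟩)
        | (have e1' := hCinj p.2 q.2 hp2.1 hp2.2 hq2.1 hq2.2 h1
           have e2' := hCinj p.1 q.1 hp1.1 hp1.2 hq1.1 hq1.2 h2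
           exact Prod.ext_iff.mpr ⟨by omega, by omega⟩))
  have hndmap : ((pvE1N e1 : List (Int × Int)).map h_c).Nodup :=
    List.Nodup.map_on hinj (PySem.Set.nodup_ofList _)
  have hperm2 : ((pvE1N e1 : List (Int × Int)).map h_c).Perm ed2 :=
    (List.perm_ext_iff_of_nodup hndmap hnd2).mpr hmemiff
  -- compare the two degree sums
  rw [pv_deg2_getD, pv_deg1_getD (pvE1N e1) N (fun p hp => (hm1 p hp).2) k hk]
  set w : Int × Int → Int := fun q => (if q.1 = c.getD k 0 then (1:Int) else 0) + (if q.2 = c.getD k 0 then 1 else 0) with hw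
  have hsum : (ed2.map w).sum = (((pvE1N e1 : List (Int × Int)).map h_c).map w).sum :=
    (List.Perm.sum_eq (List.Perm.map w hperm2)).symm
  rw [hsum, List.map_map]
  apply congrArg List.sum
  apply List.map_congr_left
  intro p hp
  obtain ⟨hple, hpb⟩ := hm1 p hp
  have hx : c.getD k 0 = C (k : Int) := by
    rw [hC]
    simp only []
    rw [PySem.List.pyGetD_natCast]
  have hiff : ∀ a : Int, 0 ≤ a → a < (N:Int) → ((C a = C (k:Int)) ↔ (a = (k:Int))) := by
    intro a ha0 ha1
    constructor
    · intro h
      exact hCinj a (k:Int) ha0 ha1 (by positivity) (by exact_mod_cast hk) h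
    · intro h; rw [h]
  have h1 := hiff p.1 hpb.1.1 hpb.1.2
  have h2 := hiff p.2 hpb.2.1 hpb.2.2
  show (if (h_c p).1 = c.getD k 0 then (1:Int) else 0) + (if (h_c p).2 = c.getD k 0 then 1 else 0) = _
  rw [hx, hhc]
  rw [pv_w_normB]
  simp only [h1, h2]

-- the heart: the pruned DFS returns the first satisfying permutation --------------

theorem pv_dfs_eq (e1 : List (Int × Int)) (ed2 : PySem.Set (Int × Int))
    (deg1 : List Int) (deg2 : PySem.Dict Int Int) (N : Nat)
    (he1 : ∀ p ∈ e1, 0 ≤ p.1 ∧ 0 ≤ p.2)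
    (hdeg : ∀ (c : List Int) (k : Nat), c.Nodup → c.length = N → k < N →
        deg2.getD (c.getD k 0) 0 ≠ PySem.List.pyGetD deg1 (k : Int) 0 →
        pvFullOk e1 ed2 c = false) :
    ∀ (f : Nat) (rem chosen : List Int), rem.length = f →
      chosen.length + rem.length = N → (chosen ++ rem).Nodup →
      pvDFS e1 ed2 deg1 deg2 f chosen rem
        = (PySem.List.permutations rem f).findSome?
            (fun rest => if pvFullOk e1 ed2 (chosen ++ rest) then some (chosen ++ rest) else none) := by
  intro f
  induction f with
  | zero =>
    intro rem chosen _ _ _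
    simp [pvDFS, PySem.List.permutations]
  | succ f ih =>
    intro rem chosen hlen hN hnodup
    rw [pvDFS]
    conv_rhs => rw [PySem.List.permutations]
    rw [pv_findSome?_flatMap]
    apply pv_findSome?_congr
    intro j hj
    rw [List.mem_range] at hj
    rw [List.getElem?_eq_getElem hj]
    simp only []
    have hrec : (rem.eraseIdx j).length = f := by
      rw [List.length_eraseIdx_of_lt hj]; omega
    have hpermj : rem.Perm (rem[j] :: rem.eraseIdx j) := (List.getElem_cons_eraseIdx_perm hj).symm
    by_cases hdegok : deg2.getD rem[j] 0 = PySem.List.pyGetD deg1 (chosen.length : Int) 0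
    · rw [if_neg (by simp [hdegok])]
      by_cases hcons : pvConsistent e1 ed2 chosen rem[j] = true
      · rw [if_pos hcons]
        rw [ih (rem.eraseIdx j) (chosen ++ [rem[j]]) hrec
            (by simp only [List.length_append, List.length_cons, List.length_nil]; omega)
            (by
              have heq : (chosen ++ [rem[j]]) ++ rem.eraseIdx j = chosen ++ rem[j] :: rem.eraseIdx j := by
                simp
              rw [heq]
              exact List.Perm.nodup (List.Perm.append_left chosen hpermj) hnodup)]
        rw [List.findSome?_map]
        apply pv_findSome?_congr
        intro p _
        simp only [Function.comp]
        rw [show chosen ++ rem[j] :: p = (chosen ++ [rem[j]]) ++ p by simp]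
      · rw [if_neg hcons]
        rw [List.findSome?_map]
        rw [List.findSome?_eq_none_iff.mpr]
        intro p _
        simp only [Function.comp]
        rw [if_neg]
        rw [pv_consistent_sound e1 ed2 he1 chosen rem[j] p (Bool.eq_false_iff.mpr hcons)]
        simp
    · -- degree filter fires: no extension can satisfy full_ok
      rw [if_pos (by simpa using hdegok)]
      rw [List.findSome?_map]
      rw [List.findSome?_eq_none_iff.mpr]
      intro p hp
      simp only [Function.comp]
      rw [if_neg]
      have hpperm : p.Perm (rem.eraseIdx j) :=
        PySem.List.perm_of_mem_permutations (by rwa [← hrec] at hp)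
      have hcperm : (chosen ++ rem[j] :: p).Perm (chosen ++ rem) :=
        (List.Perm.append_left chosen (hpperm.cons rem[j])).trans
          (List.Perm.append_left chosen hpermj).symm
      have hcnodup : (chosen ++ rem[j] :: p).Nodup := List.Perm.nodup hcperm.symm hnodup
      have hclen : (chosen ++ rem[j] :: p).length = N := by
        rw [hcperm.length_eq, List.length_append]; omega
      have hget : (chosen ++ rem[j] :: p).getD chosen.length 0 = rem[j] := by
        rw [List.getD_eq_getElem _ 0 (by rw [hclen]; omega),
            List.getElem_append_right (le_refl chosen.length)]
        simp
      rw [hdeg (chosen ++ rem[j] :: p) chosen.length hcnodup hclen (by omega)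
            (by rw [hget]; exact hdegok)]
      simp

-- the per-permutation body of A, rewritten in B's vocabulary ---------------------

theorem pv_bodyA (t1 : List (Int × Int)) (s1 s2 : List Int)
    (hnd : s1.Nodup) (hmem1 : ∀ e ∈ t1, e.1 ∈ s1 ∧ e.2 ∈ s1)
    (ed2 : PySem.Set (Int × Int)) (perm : List Int)
    (hperm : perm.Perm (PySem.List.pyRange 0 (s1.length : Int))) :
    (let mapping : PySem.Dict Int Int :=
      (PySem.List.pyRange 0 (s1.length : Int)).foldl
        (fun d i => d.insert (PySem.List.pyGetD s1 i 0)
                             (PySem.List.pyGetD s2 (PySem.List.pyGetD perm i 0) 0)) ⟨[]⟩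
     let mapped : PySem.Set (Int × Int) :=
      t1.foldl (fun s e => PySem.Set.add s (pvNorm (mapping.getD e.1 0) (mapping.getD e.2 0)))
        PySem.Set.empty
     if PySem.Set.equal mapped ed2 then some mapping.items else none)
    = (let c := perm.map (fun j => PySem.List.pyGetD s2 j 0)
       if pvFullOk (pvE1 s1 t1) ed2 c then some (s1.zip c) else none) := by
  simp only []
  have hplen : perm.length = s1.length := by
    rw [hperm.length_eq, PySem.List.pyRange_zero, List.length_map, List.length_range, Int.toNat_natCast]
  set c := perm.map (fun j => PySem.List.pyGetD s2 j 0) with hc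
  have hclen : c.length = s1.length := by rw [hc, List.length_map, hplen]
  -- step 1: the mapping dict is the zip
  have hitems :
      ((PySem.List.pyRange 0 (s1.length : Int)).foldl
        (fun d i => d.insert (PySem.List.pyGetD s1 i 0)
                             (PySem.List.pyGetD s2 (PySem.List.pyGetD perm i 0) 0)) (⟨[]⟩ : PySem.Dict Int Int)).items
        = s1.zip c := by
    rw [PySem.List.pyRange_zero, Int.toNat_natCast, List.foldl_map]
    simp only [PySem.List.pyGetD_natCast]
    rw [pv_dict_items s1 (fun i => PySem.List.pyGetD s2 (perm.getD i 0) 0) hnd s1.length le_rfl]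
    apply List.ext_getElem
    · simp [hclen]
    · intro i h1 h2
      have hi : i < s1.length := by simpa using h1
      rw [List.getElem_map, List.getElem_range, List.getElem_zip]
      simp only [hc, List.getElem_map]
      rw [List.getD_eq_getElem s1 0 hi, List.getD_eq_getElem perm 0 (by omega)]
  -- step 2: the mapped edge set is B's
  have hmapped :
      t1.foldl
          (fun s e => PySem.Set.add s (pvNorm
            ((⟨s1.zip c⟩ : PySem.Dict Int Int).getD e.1 0)
            ((⟨s1.zip c⟩ : PySem.Dict Int Int).getD e.2 0))) PySem.Set.empty
        = PySem.Set.ofList ((pvE1 s1 t1).map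
            (fun p => pvNormB (PySem.List.pyGetD c p.1 0) (PySem.List.pyGetD c p.2 0))) := by
    rw [PySem.Set.ofList_eq_foldl, pvE1, List.map_map, List.foldl_map]
    apply PySem.List.foldl_congr_mem
    intro acc e he
    have hlook : ∀ u : Int, u ∈ s1 →
        (⟨s1.zip c⟩ : PySem.Dict Int Int).getD u 0 = PySem.List.pyGetD c (pvIdx s1 u) 0 := by
      intro u hu
      rw [PySem.Dict.getD, PySem.Dict.get?]
      rw [pvIdx, PySem.List.pyGetD_natCast]
      exact pv_zip_lookup s1 c u hu (by rw [hclen])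
    rw [hlook e.1 (hmem1 e he).1, hlook e.2 (hmem1 e he).2, pv_norm_eq]
    rfl
  rw [hitems]
  have hdict : ((PySem.List.pyRange 0 (s1.length : Int)).foldl
        (fun d i => d.insert (PySem.List.pyGetD s1 i 0)
                             (PySem.List.pyGetD s2 (PySem.List.pyGetD perm i 0) 0)) (⟨[]⟩ : PySem.Dict Int Int))
      = (⟨s1.zip c⟩ : PySem.Dict Int Int) :=
    congrArg PySem.Dict.mk hitems
  rw [hdict, hmapped]
  rw [pvFullOk]

-- the top-level equality ----------------------------------------------------------

theorem pv_main (t1 t2 : List (Int × Int)) : get_node_mapping t1 t2 = get_node_mapping_alt t1 t2 := by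
  rw [get_node_mapping, get_node_mapping_alt]
  simp only [pv_nodes_eq]
  set S1 := PySem.List.sorted (PySem.Set.ofList (t1.flatMap (fun e => [e.1, e.2]))) (fun x => x) false with hS1
  set S2 := PySem.List.sorted (PySem.Set.ofList (t2.flatMap (fun e => [e.1, e.2]))) (fun x => x) false with hS2
  have hlen1 : S1.length = (PySem.Set.ofList (t1.flatMap (fun e => [e.1, e.2]))).length :=
    PySem.List.length_sorted _ _ _
  have hlen2 : S2.length = (PySem.Set.ofList (t2.flatMap (fun e => [e.1, e.2]))).length :=
    PySem.List.length_sorted _ _ _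
  by_cases hg : PySem.Set.len (PySem.Set.ofList (t1.flatMap (fun e => [e.1, e.2])))
      = PySem.Set.len (PySem.Set.ofList (t2.flatMap (fun e => [e.1, e.2])))
  · -- equal node counts: the searches run
    have hn : S1.length = S2.length := by
      rw [hlen1, hlen2]
      have := hg
      rw [PySem.Set.len, PySem.Set.len] at this
      exact_mod_cast this
    rw [if_neg (by simp only [ne_eq, Decidable.not_not]; exact hg), if_neg (by simp [hn])]
    have hnd : S1.Nodup :=
      List.Perm.nodup (PySem.List.sorted_perm _ _ _).symm (PySem.Set.nodup_ofList _)
    rw [← pv_norm_eq]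
    have hmem1 : ∀ e ∈ t1, e.1 ∈ S1 ∧ e.2 ∈ S1 := by
      intro e he
      constructor <;>
        · rw [hS1, PySem.List.mem_sorted, PySem.Set.mem_ofList]
          exact List.mem_flatMap.mpr ⟨e, he, by simp⟩
    have he1 : ∀ p ∈ pvE1 S1 t1, 0 ≤ p.1 ∧ 0 ≤ p.2 := by
      intro p hp
      rw [pvE1] at hp
      obtain ⟨e, _, rfl⟩ := List.mem_map.mp hp
      exact ⟨Int.natCast_nonneg _, Int.natCast_nonneg _⟩
    have hrange_len : (PySem.List.pyRange 0 (S1.length : Int)).length = S1.length := by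
      rw [PySem.List.pyRange_zero, List.length_map, List.length_range, Int.toNat_natCast]
    have hnd2' : S2.Nodup :=
      List.Perm.nodup (PySem.List.sorted_perm _ _ _).symm (PySem.Set.nodup_ofList _)
    have he1b : ∀ p ∈ pvE1 S1 t1,
        (0 ≤ p.1 ∧ p.1 < ((S2.length : Nat) : Int)) ∧ (0 ≤ p.2 ∧ p.2 < ((S2.length : Nat) : Int)) := by
      intro p hp
      rw [pvE1] at hp
      obtain ⟨e, he, rfl⟩ := List.mem_map.mp hp
      have h1 : S1.idxOf e.1 < S1.length := List.idxOf_lt_length_of_mem (hmem1 e he).1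
      have h2 : S1.idxOf e.2 < S1.length := List.idxOf_lt_length_of_mem (hmem1 e he).2
      rw [hn] at h1 h2
      simp only [pvIdx]
      exact ⟨⟨Int.natCast_nonneg _, by exact_mod_cast h1⟩, Int.natCast_nonneg _, by exact_mod_cast h2⟩
    have hdeg : ∀ (c : List Int) (k : Nat), c.Nodup → c.length = S2.length → k < S2.length →
        (pvDeg2 (PySem.Set.ofList (t2.map (fun e => pvNorm e.1 e.2))) S2).getD (c.getD k 0) 0
          ≠ PySem.List.pyGetD (pvDeg1 (pvE1N (pvE1 S1 t1)) S2.length) (k : Int) 0 →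
        pvFullOk (pvE1 S1 t1) (PySem.Set.ofList (t2.map (fun e => pvNorm e.1 e.2))) c = false := by
      intro c k hcnd hclen hk hne
      by_contra hfb
      rw [Bool.not_eq_false] at hfb
      exact hne (pv_deg_sound (pvE1 S1 t1) _ S2.length S2 he1b (PySem.Set.nodup_ofList _) c hcnd hclen hfb k hk)
    have hrange_map : (PySem.List.pyRange 0 (S1.length : Int)).map (fun j => PySem.List.pyGetD S2 j 0) = S2 := by
      rw [show ((S1.length : Int)) = PySem.List.len S2 by rw [PySem.List.len, hn]]
      exact PySem.List.map_pyGetD_pyRange_zero S2 0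
    have key :
        (PySem.List.permutations (PySem.List.pyRange 0 (S1.length : Int)) S1.length).findSome?
          (fun perm =>
            let mapping : PySem.Dict Int Int :=
              (PySem.List.pyRange 0 (S1.length : Int)).foldl
                (fun d i => d.insert (PySem.List.pyGetD S1 i 0)
                                     (PySem.List.pyGetD S2 (PySem.List.pyGetD perm i 0) 0)) ⟨[]⟩
            let mapped : PySem.Set (Int × Int) :=
              t1.foldl (fun s e => PySem.Set.add s (pvNorm (mapping.getD e.1 0) (mapping.getD e.2 0)))
                PySem.Set.empty
            if PySem.Set.equal mapped (PySem.Set.ofList (t2.map (fun e => pvNorm e.1 e.2))) then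
              some mapping.items else none)
          = Option.map (fun c => S1.zip c)
              (pvDFS (pvE1 S1 t1) (PySem.Set.ofList (t2.map (fun e => pvNorm e.1 e.2)))
                (pvDeg1 (pvE1N (pvE1 S1 t1)) S1.length)
                (pvDeg2 (PySem.Set.ofList (t2.map (fun e => pvNorm e.1 e.2))) S2)
                S2.length [] S2) := by
      calc
        _ = (PySem.List.permutations (PySem.List.pyRange 0 (S1.length : Int)) S1.length).findSome?
              ((fun c => if pvFullOk (pvE1 S1 t1) (PySem.Set.ofList (t2.map (fun e => pvNorm e.1 e.2))) c then
                  some (S1.zip c) else none) ∘ (List.map (fun j => PySem.List.pyGetD S2 j 0))) := by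
            apply pv_findSome?_congr
            intro perm hmem
            nth_rewrite 2 [← hrange_len] at hmem
            exact pv_bodyA t1 S1 S2 hnd hmem1 _ perm (PySem.List.perm_of_mem_permutations hmem)
        _ = ((PySem.List.permutations (PySem.List.pyRange 0 (S1.length : Int)) S1.length).map
              (List.map (fun j => PySem.List.pyGetD S2 j 0))).findSome?
              (fun c => if pvFullOk (pvE1 S1 t1) (PySem.Set.ofList (t2.map (fun e => pvNorm e.1 e.2))) c then
                  some (S1.zip c) else none) := (List.findSome?_map).symm
        _ = (PySem.List.permutations S2 S1.length).findSome?
              (fun c => if pvFullOk (pvE1 S1 t1) (PySem.Set.ofList (t2.map (fun e => pvNorm e.1 e.2))) c then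
                  some (S1.zip c) else none) := by
            rw [← pv_permutations_map, hrange_map]
        _ = ((PySem.List.permutations S2 S1.length).findSome?
              (fun c => if pvFullOk (pvE1 S1 t1) (PySem.Set.ofList (t2.map (fun e => pvNorm e.1 e.2))) c then
                  some c else none)).map (fun c => S1.zip c) := pv_findSome?_if_map _ _ _
        _ = _ := by
            rw [hn, pv_dfs_eq (pvE1 S1 t1) (PySem.Set.ofList (t2.map (fun e => pvNorm e.1 e.2)))
                  (pvDeg1 (pvE1N (pvE1 S1 t1)) S2.length)
                  (pvDeg2 (PySem.Set.ofList (t2.map (fun e => pvNorm e.1 e.2))) S2)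
                  S2.length he1 hdeg S2.length S2 [] rfl (by simp) (by simpa using hnd2')]
            apply congrArg
            apply pv_findSome?_congr
            intro p _
            rw [List.nil_append]
    rw [key]
    cases pvDFS (pvE1 S1 t1) (PySem.Set.ofList (t2.map (fun e => pvNorm e.1 e.2)))
        (pvDeg1 (pvE1N (pvE1 S1 t1)) S1.length)
        (pvDeg2 (PySem.Set.ofList (t2.map (fun e => pvNorm e.1 e.2))) S2)
        S2.length [] S2 <;> rfl
  · rw [if_pos hg, if_pos (by rw [hlen1, hlen2]; intro h; exact hg (by rw [PySem.Set.len, PySem.Set.len]; exact_mod_cast h))]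

-- ===== VERDICT (by name: the statement is the Claim_ definition above) =====
theorem get_node_mapping_spec : Claim_equal_get_node_mapping := by
  intro t1 t2 _
  exact pv_main t1 t2
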